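-- pv_equiv track=rewrite | github.com/Oleksandrigo/autom_for_folder | scripts/get_same_artists_folders.py | create_folders_dict
-- ===== SOURCE A (Python) =====
-- from typing import Generator, List, Dict, Set, Tuple
--
-- def create_folders_dict(folders_list: List[str]) -> Dict[str, List[Tuple[str, str]]]:
--     """
--     Создает словарь, где ключами являются отдельные слова из названий папок,
--     а значениями - списки кортежей (оригинальное_название, ключевое_слово).
--
--     Функция разбивает каждое название папки на отдельные слова (разделитель '+'),
--     и для каждого слова создает запись в словаре. Если слово уже есть в словаре,
--     добавляет новый кортеж в список значений.
--
--     Args: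
--         folders_list (List[str]): Список названий папок.
--
--     Returns:
--         Dict[str, List[Tuple[str, str]]]: Словарь, где ключи - отдельные слова,
--         а значения - списки кортежей с оригинальными названиями папок и ключевыми словами.
--     """
--     folders_dict = {}
--     for folder, _ in folders_list:
--         for key in folder.split("+"):
--             key = key.strip()
--             if key:
--                 folders_dict.setdefault(key, []).append((folder, key))
--     return folders_dict
-- ===== SOURCE B (Python) =====
-- def create_folders_dict(folders_list):
--     # Flatten once into (key, (folder, key)) pairs, collect first-occurrence
--     # key order, then build each key's value list by filtering the flat stream.
--     pairs = [(key, (folder, key))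
--              for folder, _ in folders_list
--              for key in map(str.strip, folder.split("+"))
--              if key]
--     keys = []
--     for key, _ in pairs:
--         if key not in keys:
--             keys.append(key)
--     return {k: [p for key, p in pairs if key == k] for k in keys}
-- ===== Notes on version B (the rewrite author's own statement) =====
-- stated objective: alternative
-- what changed: Instead of A's single pass that grows a dict via setdefault(...).append, B flattens all folder names once into a flat (key, (folder, key)) stream, collects the distinct keys in first-occurrence order, and builds each key's value list by filtering the flat stream per key.
import Mathlib
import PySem

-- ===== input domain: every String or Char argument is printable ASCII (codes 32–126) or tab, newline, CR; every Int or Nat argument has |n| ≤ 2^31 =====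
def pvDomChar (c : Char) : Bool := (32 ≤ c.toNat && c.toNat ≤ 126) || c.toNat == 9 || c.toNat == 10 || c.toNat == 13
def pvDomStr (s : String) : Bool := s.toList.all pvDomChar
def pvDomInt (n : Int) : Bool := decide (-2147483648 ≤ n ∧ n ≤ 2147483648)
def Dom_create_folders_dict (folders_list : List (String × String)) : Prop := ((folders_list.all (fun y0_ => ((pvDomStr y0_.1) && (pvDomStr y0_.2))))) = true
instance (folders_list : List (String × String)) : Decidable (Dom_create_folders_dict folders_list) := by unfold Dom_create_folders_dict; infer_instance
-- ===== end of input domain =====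

-- B replaces A's incremental setdefault-append dict by: flatten once into a (key, pair)
-- stream, dedup the keys in first-occurrence order, and build each key's value list by
-- filtering the stream (objective: alternative decomposition, not claimed faster).
-- s.split("+") is ported as (PySem.Str.split? s "+").getD [] — exact, since the separator "+" is never empty.

-- ===== PORT A =====
def create_folders_dict (folders_list : List (String × String)) : List (String × List (String × String)) :=
  (folders_list.foldl (fun d fp =>
      ((PySem.Str.split? fp.1 "+").getD []).foldl (fun d key0 =>
        let key := PySem.Str.strip key0
        if key ≠ "" then d.modify key [] (· ++ [(fp.1, key)]) else d) d)
    PySem.Dict.empty).items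

-- ===== PORT B =====
def create_folders_dict_alt (folders_list : List (String × String)) : List (String × List (String × String)) :=
  let pairs := folders_list.flatMap (fun fp =>
    ((((PySem.Str.split? fp.1 "+").getD []).map PySem.Str.strip).filter (fun k => k ≠ "")).map
      (fun key => (key, (fp.1, key))))
  let keys := pairs.foldl (fun ks p => if p.1 ∈ ks then ks else ks ++ [p.1]) ([] : List String)
  keys.map (fun k => (k, (pairs.filter (fun q => q.1 == k)).map (·.2)))

-- ===== PRECONDITION & SPEC =====
def Spec_create_folders_dict (folders_list : List (String × String)) (out : List (String × List (String × String))) : Prop := out = create_folders_dict_alt folders_list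
instance (folders_list : List (String × String)) (out : List (String × List (String × String))) : Decidable (Spec_create_folders_dict folders_list out) := by unfold Spec_create_folders_dict; infer_instance

-- ===== CLAIM (what is proved, stated in full; the proofs are below) =====
def Claim_equal_create_folders_dict : Prop := ∀ (folders_list : List (String × String)), Dom_create_folders_dict folders_list → Spec_create_folders_dict folders_list (create_folders_dict folders_list)

-- ===== LEMMAS AND PROOFS =====

-- A's inner word loop is the grouping step folded over the folder's (key, pair) stream
theorem pv_inner (f : String) (ws : List String) (d : PySem.Dict String (List (String × String))) :
    ws.foldl (fun d key0 =>
        let key := PySem.Str.strip key0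
        if key ≠ "" then d.modify key [] (· ++ [(f, key)]) else d) d
    = (((ws.map PySem.Str.strip).filter (fun k => k ≠ "")).map (fun key => (key, (f, key)))).foldl
        (fun d p => d.modify p.1 [] (· ++ [p.2])) d := by
  induction ws generalizing d with
  | nil => rfl
  | cons w ws ih =>
    by_cases h : PySem.Str.strip w = ""
    · simpa [List.foldl_cons, List.filter_cons, h] using ih d
    · simpa [List.foldl_cons, List.filter_cons, h] using
        ih (d.modify (PySem.Str.strip w) [] (· ++ [(f, PySem.Str.strip w)]))

-- folding the grouping step folder by folder = folding it over the concatenated stream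
theorem pv_outer (g : String × String → List (String × (String × String)))
    (fl : List (String × String)) (d : PySem.Dict String (List (String × String))) :
    fl.foldl (fun d fp => (g fp).foldl (fun d p => d.modify p.1 [] (· ++ [p.2])) d) d
    = (fl.flatMap g).foldl (fun d p => d.modify p.1 [] (· ++ [p.2])) d := by
  induction fl generalizing d with
  | nil => rfl
  | cons fp fl ih => simp [ih, List.foldl_append]

-- B's "if key not in keys: keys.append(key)" loop is ordered dedup of the stream's keys
theorem pv_keys (ps : List (String × (String × String))) :
    ps.foldl (fun ks p => if p.1 ∈ ks then ks else ks ++ [p.1]) ([] : List String)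
    = PySem.Set.ofList (ps.map Prod.fst) := by
  rw [PySem.Set.ofList_eq_foldl, List.foldl_map]
  refine PySem.List.foldl_congr_mem ps _ _ [] ?_
  intro acc x _
  by_cases h : x.1 ∈ acc <;> simp [PySem.Set.add, PySem.Set.contains, h]

theorem create_folders_dict_spec : Claim_equal_create_folders_dict := by
  intro fl _
  unfold Spec_create_folders_dict
  simp only [create_folders_dict, create_folders_dict_alt]
  rw [pv_keys]
  have h1 :
      fl.foldl (fun d fp =>
          (((PySem.Str.split? fp.1 "+").getD []).foldl (fun d key0 =>
            let key := PySem.Str.strip key0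
            if key ≠ "" then d.modify key [] (· ++ [(fp.1, key)]) else d) d))
        PySem.Dict.empty
      = (fl.flatMap (fun fp =>
          ((((PySem.Str.split? fp.1 "+").getD []).map PySem.Str.strip).filter (fun k => k ≠ "")).map
            (fun key => (key, (fp.1, key))))).foldl
          (fun d p => d.modify p.1 [] (· ++ [p.2])) PySem.Dict.empty := by
    rw [← pv_outer]
    exact PySem.List.foldl_congr_mem fl _ _ _ (fun d fp _ => pv_inner fp.1 _ d)
  rw [h1]
  have hnd := PySem.Dict.nodup_keys_foldl_modify_key
    (fl.flatMap (fun fp =>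
      ((((PySem.Str.split? fp.1 "+").getD []).map PySem.Str.strip).filter (fun k => k ≠ "")).map
        (fun key => (key, (fp.1, key)))))
    Prod.fst [] (fun _ p => (· ++ [p.2])) PySem.Dict.empty PySem.Dict.nodup_keys_empty
  rw [PySem.Dict.items_eq_map_keys _ hnd []]
  rw [PySem.Dict.keys_foldl_modify_key]
  simp only [PySem.Dict.keys_empty, PySem.Set.update_nil_left]
  apply List.map_congr_left
  intro k _
  rw [PySem.Dict.getD_foldl_modify_append]
  simp
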